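-- pv_equiv track=rewrite | github.com/MOysolova/Python | week_5/1.On-Budget/budget.py | on_budget
-- ===== SOURCE A (Python) =====
-- def on_budget(books, budget):
--     result = {"books_on_budget": 0, "loan": 0}
--     count = 0
--     total_price = sum(books)
--     books = sorted(books)
--
--     for book in books:
--         if budget - book < 0:
--             break
--         budget -= book # От бюджета вадим книгата
--         total_price -= book # От сумата на всички книги вадим сумата на книгата
--         count += 1
-- # Записваме резултатите в речника
--     result["books_on_budget"] = count
--     loan = total_price - budget
--     result["loan"] = loan
--
--     return result
-- ===== SOURCE B (Python) =====
-- def on_budget(books, budget):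
--     # Bucket the books by price and buy each price group in bulk with integer
--     # division; loan is closed-form: total - budget is invariant under buying.
--     counts = {}
--     total = 0
--     for b in books:
--         counts[b] = counts.get(b, 0) + 1
--         total += b
--     remaining = budget
--     count = 0
--     for price in sorted(counts):
--         c = counts[price]
--         if remaining < price:
--             break
--         if price <= 0:
--             count += c
--             remaining -= c * price
--         else:
--             t = remaining // price
--             if t >= c:
--                 count += c
--                 remaining -= c * price
--             else:
--                 count += t
--                 break
--     return {"books_on_budget": count, "loan": total - budget}
-- ===== Notes on version B (the rewrite author's own statement) =====
-- stated objective: alternative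
-- what changed: Replaces the per-book greedy loop over the sorted list with a bucket-by-price pass (one counting dict + running total), then a loop over the sorted distinct prices that buys each whole price group in bulk via integer division, with the loan computed by its closed form total - budget.
import Mathlib
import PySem

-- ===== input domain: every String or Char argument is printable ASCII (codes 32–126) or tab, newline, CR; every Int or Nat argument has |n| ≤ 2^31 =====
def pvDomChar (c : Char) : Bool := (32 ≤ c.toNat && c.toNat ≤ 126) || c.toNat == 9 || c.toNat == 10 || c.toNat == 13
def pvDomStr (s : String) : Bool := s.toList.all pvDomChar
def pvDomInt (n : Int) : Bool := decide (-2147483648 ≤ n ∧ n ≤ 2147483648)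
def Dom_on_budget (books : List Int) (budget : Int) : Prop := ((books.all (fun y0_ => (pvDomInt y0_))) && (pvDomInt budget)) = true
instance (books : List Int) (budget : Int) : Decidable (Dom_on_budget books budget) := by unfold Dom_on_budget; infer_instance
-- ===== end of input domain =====

-- B buckets the books by price (counting dict + running total in one pass) and buys each whole
-- price group in bulk with integer division; the loan is the closed form total - budget.
-- Objective: alternative algorithm (per-group bulk arithmetic instead of a per-book greedy loop).

-- ===== PORT A =====
-- the for-loop with break: state (budget, total_price, count)
def pvLoopA : List Int → Int → Int → Int → Int × Int × Int
  | [], budget, total, count => (budget, total, count)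
  | b :: rest, budget, total, count =>
    if budget - b < 0 then (budget, total, count)
    else pvLoopA rest (budget - b) (total - b) (count + 1)

def on_budget (books : List Int) (budget : Int) : List (String × Int) :=
  let result := (PySem.Dict.empty.insert "books_on_budget" (0 : Int)).insert "loan" 0
  let total_price := books.sum
  let books' := PySem.List.sorted books (fun x => x) false
  let st := pvLoopA books' budget total_price 0
  let result := result.insert "books_on_budget" st.2.2
  let loan := st.2.1 - st.1
  let result := result.insert "loan" loan
  result.items

-- ===== PORT B =====
-- 'for price in sorted(counts): …' with break: buys each price group in bulk
def pvLoopB : List Int → PySem.Dict Int Int → Int → Int → Int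
  | [], _, _, count => count
  | p :: rest, counts, remaining, count =>
    let c := counts.getD p 0
    if remaining < p then count
    else if p ≤ 0 then pvLoopB rest counts (remaining - c * p) (count + c)
    else
      let t := PySem.Int.floordiv remaining p
      if t ≥ c then pvLoopB rest counts (remaining - c * p) (count + c)
      else count + t

def on_budget_alt (books : List Int) (budget : Int) : List (String × Int) :=
  -- one pass: counts[b] = counts.get(b, 0) + 1; total += b
  let st := books.foldl
    (fun (s : PySem.Dict Int Int × Int) b => (s.1.insert b (s.1.getD b 0 + 1), s.2 + b))
    (PySem.Dict.empty, 0)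
  let count := pvLoopB (PySem.List.sorted st.1.keys (fun x => x) false) st.1 budget 0
  [("books_on_budget", count), ("loan", st.2 - budget)]

-- ===== PRECONDITION & SPEC =====
def Spec_on_budget (books : List Int) (budget : Int) (out : List (String × Int)) : Prop := out = on_budget_alt books budget
instance (books : List Int) (budget : Int) (out : List (String × Int)) : Decidable (Spec_on_budget books budget out) := by unfold Spec_on_budget; infer_instance

-- ===== CLAIM (what is proved, stated in full; the proofs are below) =====
def Claim_equal_on_budget : Prop := ∀ (books : List Int) (budget : Int), Dom_on_budget books budget → Spec_on_budget books budget (on_budget books budget)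

-- ===== LEMMAS AND PROOFS =====

-- the loan is invariant: both components drop by the same amount each step
lemma pvLoopA_diff (bs : List Int) : ∀ (budget total count : Int),
    (pvLoopA bs budget total count).2.1 - (pvLoopA bs budget total count).1 = total - budget := by
  induction bs with
  | nil => intro budget total count; simp [pvLoopA]
  | cons b rest ih =>
    intro budget total count
    simp only [pvLoopA]
    split
    · simp
    · rw [ih]; ring

-- B's one-pass fold splits into the counting fold and the sum
lemma pvFold_split (bs : List Int) : ∀ (d : PySem.Dict Int Int) (s : Int),
    bs.foldl (fun (st : PySem.Dict Int Int × Int) b => (st.1.insert b (st.1.getD b 0 + 1), st.2 + b)) (d, s)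
      = (bs.foldl (fun d b => d.insert b (d.getD b 0 + 1)) d, s + bs.sum) := by
  induction bs with
  | nil => intro d s; simp
  | cons b rest ih =>
    intro d s
    simp only [List.foldl_cons, List.sum_cons, ih]
    ring_nf

-- bulk step: c affordable copies of p are bought one by one
lemma pvLoopA_bulk (c : Nat) : ∀ (p B T n : Int) (rest : List Int),
    (∀ i : Nat, i < c → p ≤ B - i * p) →
    pvLoopA (List.replicate c p ++ rest) B T n = pvLoopA rest (B - c * p) (T - c * p) (n + c) := by
  induction c with
  | zero => intro p B T n rest _; simp
  | succ c ih =>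
    intro p B T n rest h
    have h0 : p ≤ B := by simpa using h 0 (Nat.succ_pos c)
    simp only [List.replicate_succ, List.cons_append, pvLoopA, if_neg (by omega : ¬ B - p < 0)]
    rw [ih p (B - p) (T - p) (n + 1) rest (fun i hi => by
      have := h (i + 1) (by omega)
      push_cast at this ⊢
      linarith)]
    have e1 : B - p - (c : Int) * p = B - ((c : Nat) + 1 : Int) * p := by ring
    have e2 : T - p - (c : Int) * p = T - ((c : Nat) + 1 : Int) * p := by ring
    have e3 : n + 1 + (c : Int) = n + ((c : Nat) + 1 : Int) := by ring
    rw [e1, e2, e3]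
    push_cast
    ring_nf

-- partial step: after t copies of p the next copy is unaffordable and the loop breaks
lemma pvLoopA_break (t : Nat) : ∀ (c : Nat) (p B T n : Int) (rest : List Int),
    t < c →
    (∀ i : Nat, i < t → p ≤ B - i * p) →
    B - t * p < p →
    pvLoopA (List.replicate c p ++ rest) B T n = (B - t * p, T - t * p, n + t) := by
  induction t with
  | zero =>
    intro c p B T n rest hc _ hbreak
    obtain ⟨c', rfl⟩ := Nat.exists_eq_add_of_lt hc
    norm_num at hbreak
    simp only [Nat.zero_add, List.replicate_succ, List.cons_append, pvLoopA,
      if_pos (by omega : B - p < 0)]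
    norm_num
  | succ t ih =>
    intro c p B T n rest hc h hbreak
    obtain ⟨c', rfl⟩ := Nat.exists_eq_add_of_lt hc
    have h0 : p ≤ B := by simpa using h 0 (Nat.succ_pos t)
    simp only [List.replicate_succ, List.cons_append, pvLoopA,
      if_neg (by omega : ¬ B - p < 0)]
    rw [ih (t + 1 + c') p (B - p) (T - p) (n + 1) rest (by omega)
      (fun i hi => by
        have := h (i + 1) (by omega)
        push_cast at this ⊢
        linarith)
      (by push_cast at hbreak ⊢; linarith)]
    simp only [Prod.mk.injEq]
    refine ⟨by push_cast; ring, by push_cast; ring, by push_cast; ring⟩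

-- counting over grouped replicates
lemma count_flatMap_replicate (ks : List Int) (cnt : Int → Nat) (hnd : ks.Nodup) (q : Int) :
    (ks.flatMap (fun p => List.replicate (cnt p) p)).count q = if q ∈ ks then cnt q else 0 := by
  induction ks with
  | nil => simp
  | cons p rest ih =>
    simp only [List.flatMap_cons, List.count_append, List.count_replicate,
      ih (List.nodup_cons.mp hnd).2, List.mem_cons]
    rcases List.nodup_cons.mp hnd with ⟨hp, _⟩
    by_cases hq : q = p
    · subst hq; simp [hp]
    · simp [Ne.symm hq, hq]

-- the grouped list is ordered when the keys are strictly increasing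
lemma pairwise_flatMap_replicate (ks : List Int) (cnt : Int → Nat) (hlt : ks.Pairwise (· < ·)) :
    (ks.flatMap (fun p => List.replicate (cnt p) p)).Pairwise (· ≤ ·) := by
  induction ks with
  | nil => simp
  | cons p rest ih =>
    rcases List.pairwise_cons.mp hlt with ⟨hp, hrest⟩
    simp only [List.flatMap_cons]
    refine List.pairwise_append.mpr ⟨List.pairwise_replicate.mpr (by simp), ih hrest, ?_⟩
    intro a ha b hb
    obtain ⟨k, hk, hbk⟩ := List.mem_flatMap.mp hb
    rw [List.eq_of_mem_replicate ha, List.eq_of_mem_replicate hbk]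
    exact le_of_lt (hp k hk)

-- the heart: A's greedy loop over the grouped sorted list equals B's bulk loop over the keys
lemma pvLoop_eq (ks : List Int) : ∀ (d : PySem.Dict Int Int) (cnt : Int → Nat) (B T n : Int),
    ks.Pairwise (· < ·) →
    (∀ p ∈ ks, d.getD p 0 = (cnt p : Int)) →
    (∀ p ∈ ks, 0 < cnt p) →
    (pvLoopA (ks.flatMap (fun p => List.replicate (cnt p) p)) B T n).2.2 = pvLoopB ks d B n := by
  induction ks with
  | nil => intro d cnt B T n _ _ _; simp [pvLoopA, pvLoopB]
  | cons p rest ih =>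
    intro d cnt B T n hlt hd hpos
    rcases List.pairwise_cons.mp hlt with ⟨_, hrest⟩
    have hdp : d.getD p 0 = (cnt p : Int) := hd p (List.mem_cons_self ..)
    have hcpos : 0 < cnt p := hpos p (List.mem_cons_self ..)
    simp only [List.flatMap_cons, pvLoopB, hdp]
    by_cases h1 : B < p
    · -- first copy already unaffordable
      obtain ⟨c', hc'⟩ := Nat.exists_eq_add_of_lt hcpos
      rw [if_pos h1, hc']
      simp only [Nat.zero_add, List.replicate_succ, List.cons_append, pvLoopA,
        if_pos (by omega : B - p < 0)]
    · rw [if_neg h1]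
      by_cases h2 : p ≤ 0
      · -- nonpositive price: all copies affordable
        rw [if_pos h2,
          pvLoopA_bulk (cnt p) p B T n _ (fun i hi => by
            have : (i : Int) * p ≤ 0 := mul_nonpos_of_nonneg_of_nonpos (by positivity) h2
            omega)]
        exact ih d cnt (B - (cnt p : Int) * p) (T - (cnt p : Int) * p) (n + (cnt p : Int)) hrest
          (fun q hq => hd q (List.mem_cons_of_mem _ hq)) (fun q hq => hpos q (List.mem_cons_of_mem _ hq))
      · rw [if_neg h2]
        have hp : 0 < p := by omega
        set t := PySem.Int.floordiv B p with ht
        by_cases h3 : t ≥ (cnt p : Int)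
        · -- whole group affordable
          rw [if_pos h3,
            pvLoopA_bulk (cnt p) p B T n _ (fun i hi => by
              have : ((i : Int) + 1) * p ≤ B := by
                rw [← PySem.Int.le_floordiv_iff_mul_le hp, ← ht]
                omega
              linarith)]
          exact ih d cnt (B - (cnt p : Int) * p) (T - (cnt p : Int) * p) (n + (cnt p : Int)) hrest
            (fun q hq => hd q (List.mem_cons_of_mem _ hq)) (fun q hq => hpos q (List.mem_cons_of_mem _ hq))
        · -- partial group: t copies then break
          rw [if_neg h3]
          have ht1 : 1 ≤ t := by
            rw [ht, PySem.Int.le_floordiv_iff_mul_le hp]; omega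
          have htn : (t.toNat : Int) = t := Int.toNat_of_nonneg (by omega)
          rw [pvLoopA_break t.toNat (cnt p) p B T n _ (by omega)
            (fun i hi => by
              have : ((i : Int) + 1) * p ≤ B := by
                rw [← PySem.Int.le_floordiv_iff_mul_le hp, ← ht]
                omega
              linarith)
            (by
              have : B < (t + 1) * p := by
                rw [← PySem.Int.floordiv_lt_iff_lt_mul hp, ← ht]; omega
              rw [htn]; linarith)]
          simp [htn]

-- B's counting fold is the Counter, named in PySem
lemma pvCounts_eq (books : List Int) :
    books.foldl (fun d b => d.insert b (d.getD b 0 + 1)) PySem.Dict.empty = PySem.Dict.counter books :=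
  PySem.Dict.foldl_insert_getD_add_one_eq_counter books

-- sorting the books = grouping the sorted distinct prices with their multiplicities
lemma sorted_eq_grouped (books : List Int) :
    PySem.List.sorted books (fun x => x) false
      = (PySem.List.sorted (PySem.Set.ofList books) (fun x => x) false).flatMap
          (fun p => List.replicate (books.count p) p) := by
  set ks := PySem.List.sorted (PySem.Set.ofList books) (fun x => x) false with hks
  have hlt : ks.Pairwise (· < ·) := PySem.List.sorted_ofList_pairwise_lt books
  have hnd : ks.Nodup := hlt.nodup
  have hmem : ∀ q : Int, q ∈ ks ↔ q ∈ books := by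
    intro q
    rw [hks, PySem.List.mem_sorted, PySem.Set.mem_ofList]
  apply PySem.List.sorted_id_eq_of_perm_of_pairwise
  · rw [List.perm_iff_count]
    intro q
    rw [count_flatMap_replicate ks _ hnd q]
    by_cases hq : q ∈ books
    · simp [(hmem q).mpr hq]
    · have hks : q ∉ ks := fun h => hq ((hmem q).mp h)
      simp [hks, List.count_eq_zero_of_not_mem hq]
  · exact pairwise_flatMap_replicate ks _ hlt

-- the four inserts on the literal-keyed dict produce exactly B's literal list
lemma pv_dict_items (c l : Int) :
    ((((PySem.Dict.empty.insert "books_on_budget" (0 : Int)).insert "loan" 0).insert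
        "books_on_budget" c).insert "loan" l).items
      = [("books_on_budget", c), ("loan", l)] := by
  rfl

-- ===== VERDICT (by name: the statement is the Claim_ definition above) =====
theorem on_budget_spec : Claim_equal_on_budget := by
  intro books budget _
  unfold Spec_on_budget on_budget on_budget_alt
  simp only [pvFold_split, pvCounts_eq]
  rw [pv_dict_items]
  have hkeys : (PySem.Dict.counter books).keys = PySem.Set.ofList books :=
    PySem.Dict.keys_counter books
  have hcount : (pvLoopA (PySem.List.sorted books (fun x => x) false) budget books.sum 0).2.2
      = pvLoopB (PySem.List.sorted (PySem.Dict.counter books).keys (fun x => x) false)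
          (PySem.Dict.counter books) budget 0 := by
    rw [hkeys, sorted_eq_grouped books]
    apply pvLoop_eq _ _ (fun p => books.count p) _ _ _
      (PySem.List.sorted_ofList_pairwise_lt books)
    · intro p _
      exact PySem.Dict.getD_counter books p
    · intro p hp
      rw [List.count_pos_iff]
      rw [PySem.List.mem_sorted, PySem.Set.mem_ofList] at hp
      exact hp
  rw [hcount, pvLoopA_diff]
  simp
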